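-- pv_equiv track=rewrite | github.com/JOSCHLINER/adventofcode | DayThirdteen/one.py | horizontal_detection
-- ===== SOURCE A (Python) =====
-- def horizontal_detection(shadows: list[str]):
--     def all_same(l: int, u: int):
--         return all(shadows[l + i] == shadows[u - i] for i in range(1, u - l + 1))
--
--     # from left
--     row_left = shadows[0]
--     for j in range(1, len(shadows)):
--         if row_left == shadows[j]:
--             if all_same(0, j):
--                 return 100 * (j + 1) // 2
--
--     # from right
--     row_right = shadows[-1]
--     for j in range(len(shadows) - 2, -1, -1):
--         if row_right == shadows[j]:
--             if all_same(j, len(shadows) - 1):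
--                 return 100 * (j + (len(shadows) - j) // 2)
--
--     return -1
-- ===== SOURCE B (Python) =====
-- def horizontal_detection(shadows: list[str]):
--     n = len(shadows)
--     # Bottom-up interval DP over gap = r - l, keeping only the SPARSE set of
--     # left ends l whose segment [l, l+gap] is a palindrome:
--     #   pal(l, l+gap)  <=>  pal(l+1, l+gap-1) and shadows[l] == shadows[l+gap],
--     # so each generation is filtered from the one two gaps below.  Gaps grow,
--     # hence the first palindromic prefix can be returned at once; the first
--     # palindromic-suffix gap is recorded and used only if no palindromic
--     # prefix exists at any gap.
--     first_suffix = None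
--     act2 = []
--     act1 = []
--     for gap in range(n):
--         if gap < 2:
--             cur = [l for l in range(n - gap) if shadows[l] == shadows[l + gap]]
--         else:
--             cur = [l - 1 for l in act2
--                    if 1 <= l and l - 1 + gap < n and shadows[l - 1] == shadows[l - 1 + gap]]
--         if gap >= 1 and 0 in cur:
--             return 100 * (gap + 1) // 2
--         if gap >= 1 and first_suffix is None and (n - 1 - gap) in cur:
--             first_suffix = gap
--         act2, act1 = act1, cur
--     if first_suffix is not None:
--         j = n - 1 - first_suffix
--         return 100 * (j + (n - j) // 2)
--     return -1
-- ===== Notes on version B (the rewrite author's own statement) =====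
-- stated objective: alternative
-- what changed: replaces A's per-candidate rescanning (an inner index-pair loop run afresh for every candidate line) by a bottom-up interval dynamic program over growing gap lengths that keeps the sparse set of palindromic left ends, each generation filtered from the one two gaps below via pal(l,r)=pal(l+1,r-1) and rows[l]==rows[r], returning at the first palindromic prefix and recording the first palindromic-suffix gap
import Mathlib
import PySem

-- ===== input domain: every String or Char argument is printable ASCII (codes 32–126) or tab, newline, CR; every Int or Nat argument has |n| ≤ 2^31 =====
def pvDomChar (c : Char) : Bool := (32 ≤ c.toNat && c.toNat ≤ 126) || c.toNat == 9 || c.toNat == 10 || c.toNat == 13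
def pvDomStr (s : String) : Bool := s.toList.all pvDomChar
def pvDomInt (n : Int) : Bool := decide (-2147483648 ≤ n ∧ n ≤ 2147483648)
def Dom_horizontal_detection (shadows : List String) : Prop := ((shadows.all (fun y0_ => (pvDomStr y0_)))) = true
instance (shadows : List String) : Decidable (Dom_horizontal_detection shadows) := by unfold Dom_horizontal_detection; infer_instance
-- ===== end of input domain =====

-- B replaces A's per-candidate inner rescans by a bottom-up interval DP over gap lengths
-- keeping the sparse set of palindromic left ends (recurrence pal(l,r) = pal(l+1,r-1) ∧
-- rows[l]=rows[r], ascending gaps, early exit at the first palindromic prefix); objective: alternative.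

-- ===== PORT A =====
-- inner helper all_same(l, u) of A
def pvAllSame (shadows : List String) (l u : Int) : Bool :=
  (PySem.List.pyRange 1 (u - l + 1) 1).all
    (fun i => PySem.List.pyGetD shadows (l + i) "" == PySem.List.pyGetD shadows (u - i) "")

def horizontal_detection (shadows : List String) : Int :=
  match (PySem.List.pyRange 1 (shadows.length : Int) 1).findSome? (fun j =>
      if PySem.List.pyGetD shadows 0 "" == PySem.List.pyGetD shadows j "" then
        if pvAllSame shadows 0 j then some (PySem.Int.floordiv (100 * (j + 1)) 2) else none
      else none) with
  | some v => v
  | none =>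
    match (PySem.List.pyRange ((shadows.length : Int) - 2) (-1) (-1)).findSome? (fun j =>
        if PySem.List.pyGetD shadows (-1) "" == PySem.List.pyGetD shadows j "" then
          if pvAllSame shadows j ((shadows.length : Int) - 1) then
            some (100 * (j + PySem.Int.floordiv ((shadows.length : Int) - j) 2))
          else none
        else none) with
    | some v => v
    | none => -1

-- ===== PORT B =====
-- the sparse active set of B's comprehension at one gap
def pvCur (shadows : List String) (n : Nat) (act2 : List Nat) (gap : Nat) : List Nat :=
  if gap < 2 then
    (List.range (n - gap)).filter (fun l => shadows.getD l "" == shadows.getD (l + gap) "")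
  else
    act2.filterMap (fun l =>
      if 1 ≤ l ∧ l - 1 + gap < n ∧ shadows.getD (l - 1) "" = shadows.getD (l - 1 + gap) "" then
        some (l - 1)
      else none)

-- B's gap loop: state (act2, act1, first_suffix), early return at the first palindromic prefix
def pvLoop (shadows : List String) (n : Nat) (act2 act1 : List Nat) (fs : Option Nat)
    (gap : Nat) : Int :=
  if _h : gap < n then
    let cur := pvCur shadows n act2 gap
    if 1 ≤ gap && cur.contains 0 then
      PySem.Int.floordiv (100 * ((gap : Int) + 1)) 2
    else
      pvLoop shadows n act1 cur
        (if 1 ≤ gap && fs.isNone && cur.contains (n - 1 - gap) then some gap else fs)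
        (gap + 1)
  else
    match fs with
    | some g =>
        100 * (((n : Int) - 1 - (g : Int)) +
          PySem.Int.floordiv ((n : Int) - ((n : Int) - 1 - (g : Int))) 2)
    | none => -1
termination_by n - gap

def horizontal_detection_alt (shadows : List String) : Int :=
  pvLoop shadows shadows.length [] [] none 0

-- ===== PRECONDITION & SPEC =====
-- A evaluates shadows[0] first, so it raises IndexError exactly on the empty list.
def Pre_horizontal_detection (shadows : List String) : Prop := shadows ≠ []
instance (shadows : List String) : Decidable (Pre_horizontal_detection shadows) := by
  unfold Pre_horizontal_detection; infer_instance

def pvWitness_horizontal_detection : List String := ["ab", "cd", "cd", "ab"]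

def Spec_horizontal_detection (shadows : List String) (out : Int) : Prop :=
  out = horizontal_detection_alt shadows
instance (shadows : List String) (out : Int) : Decidable (Spec_horizontal_detection shadows out) := by
  unfold Spec_horizontal_detection; infer_instance

-- ===== CLAIM (what is proved, stated in full; the proofs are below) =====
def Claim_equal_horizontal_detection : Prop := ∀ (shadows : List String),
  Dom_horizontal_detection shadows → Pre_horizontal_detection shadows →
  Spec_horizontal_detection shadows (horizontal_detection shadows)

-- ===== LEMMAS AND PROOFS =====

-- pvP xs l g: the segment xs[l .. l+g] (length g+1) is a palindrome
def pvP (xs : List String) (l g : Nat) : Bool :=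
  ((xs.drop l).take (g + 1)) == ((xs.drop l).take (g + 1)).reverse

-- first index in [m, k) satisfying p
def pvFirst (p : Nat → Bool) (m k : Nat) : Option Nat := (List.range' m (k - m)).find? p

-- the common closed form both programs compute
def pvVal (xs : List String) : Int :=
  match pvFirst (fun g => pvP xs 0 g) 1 xs.length with
  | some g => PySem.Int.floordiv (100 * ((g : Int) + 1)) 2
  | none =>
    match pvFirst (fun g => pvP xs (xs.length - 1 - g) g) 1 xs.length with
    | some g =>
        100 * (((xs.length : Int) - 1 - (g : Int)) +
          PySem.Int.floordiv ((xs.length : Int) - ((xs.length : Int) - 1 - (g : Int))) 2)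
    | none => -1

-- what pvLoop computes from an intermediate state
def pvRhs (xs : List String) (gap : Nat) (fs : Option Nat) : Int :=
  match pvFirst (fun g => pvP xs 0 g) (max gap 1) xs.length with
  | some g => PySem.Int.floordiv (100 * ((g : Int) + 1)) 2
  | none =>
    match (match fs with
           | some g => some g
           | none => pvFirst (fun g => pvP xs (xs.length - 1 - g) g) (max gap 1) xs.length) with
    | some g =>
        100 * (((xs.length : Int) - 1 - (g : Int)) +
          PySem.Int.floordiv ((xs.length : Int) - ((xs.length : Int) - 1 - (g : Int))) 2)
    | none => -1

theorem pvFindSome?_congr_mem {α β : Type} (l : List α) (f g : α → Option β)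
    (h : ∀ a ∈ l, f a = g a) : l.findSome? f = l.findSome? g := by
  induction l with
  | nil => rfl
  | cons a t ih =>
    have ha : f a = g a := h a (by exact List.mem_cons_self ..)
    rw [List.findSome?_cons, List.findSome?_cons, ha]
    cases g a with
    | none => exact ih (fun x hx => h x (List.mem_cons_of_mem _ hx))
    | some v => rfl

theorem pvFindSome?_if {α β : Type} (l : List α) (p : α → Bool) (f : α → β) :
    l.findSome? (fun a => if p a then some (f a) else none) = (l.find? p).map f := by
  induction l with
  | nil => rfl
  | cons a t ih =>
    rw [List.findSome?_cons, List.find?_cons]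
    by_cases h : p a
    · simp [h]
    · simp only [h, Bool.false_eq_true, if_false]
      exact ih

theorem pvBeqComm (a b : String) : (a == b) = (b == a) := by
  rw [Bool.eq_iff_iff, beq_iff_eq, beq_iff_eq]; exact eq_comm

-- a segment [d, d+L) of xs is a palindrome iff the index-pair condition holds
theorem pvSegPal (xs : List String) (d L : Nat) (hlen : d + L ≤ xs.length) (hL : 1 ≤ L) :
    ((xs.drop d).take L = ((xs.drop d).take L).reverse) ↔
      (∀ t : Nat, (ht : t < L) → xs[d + t]'(by omega) = xs[d + (L - 1 - t)]'(by omega)) := by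
  have hlen' : ((xs.drop d).take L).length = L := by
    simp [List.length_take, List.length_drop]; omega
  constructor
  · intro h t ht
    have p1 : t < ((xs.drop d).take L).length := by rw [hlen']; exact ht
    have e := List.getElem_of_eq h p1
    rw [List.getElem_reverse] at e
    simp only [List.getElem_take, List.getElem_drop, hlen'] at e
    exact e
  · intro h
    apply List.ext_getElem (by simp)
    intro i h1 h2
    have hiL : i < L := by rw [hlen'] at h1; exact h1
    rw [List.getElem_reverse]
    simp only [List.getElem_take, List.getElem_drop, hlen']
    exact h i hiL

-- the combined condition of A (endpoint check && all_same) characterises the palindrome segment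
theorem pvCondPal (xs : List String) (d L : Nat) (hlen : d + L ≤ xs.length) (hL : 2 ≤ L) :
    (((PySem.List.pyGetD xs (d : Int) "" == PySem.List.pyGetD xs ((d : Int) + (L : Int) - 1) "") &&
        pvAllSame xs (d : Int) ((d : Int) + (L : Int) - 1)) = true) ↔
      ((xs.drop d).take L = ((xs.drop d).take L).reverse) := by
  rw [pvSegPal xs d L hlen (by omega)]
  rw [PySem.List.pyGetD_eq_getElem xs "" (by omega) (by omega)]
  rw [PySem.List.pyGetD_eq_getElem xs "" (by omega) (by omega)]
  unfold pvAllSame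
  have hrange : (d : Int) + (L : Int) - 1 - (d : Int) + 1 = (L : Int) := by ring
  rw [hrange]
  simp only [Bool.and_eq_true, List.all_eq_true, PySem.List.mem_pyRange_one, beq_iff_eq]
  constructor
  · rintro ⟨hend, hall⟩ t ht
    by_cases h0 : t = 0
    · subst h0
      simpa [show ((d : Int)).toNat = d by omega,
        show ((d : Int) + (L : Int) - 1).toNat = d + (L - 1 - 0) by omega] using hend
    · have := hall (t : Int) ⟨by omega, by omega⟩
      rw [PySem.List.pyGetD_eq_getElem xs "" (by omega) (by omega),
          PySem.List.pyGetD_eq_getElem xs "" (by omega) (by omega)] at this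
      simpa [show ((d : Int) + (t : Int)).toNat = d + t by omega,
        show ((d : Int) + (L : Int) - 1 - (t : Int)).toNat = d + (L - 1 - t) by omega] using this
  · intro h
    constructor
    · have := h 0 (by omega)
      simpa [show ((d : Int)).toNat = d by omega,
        show ((d : Int) + (L : Int) - 1).toNat = d + (L - 1 - 0) by omega] using this
    · intro i hi
      obtain ⟨hi1, hi2⟩ := hi
      rw [PySem.List.pyGetD_eq_getElem xs "" (by omega) (by omega),
          PySem.List.pyGetD_eq_getElem xs "" (by omega) (by omega)]
      have hiL : i.toNat < L := by omega
      have := h i.toNat hiL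
      simpa [show ((d : Int) + i).toNat = d + i.toNat by omega,
        show ((d : Int) + (L : Int) - 1 - i).toNat = d + (L - 1 - i.toNat) by omega] using this

-- collapse A's nested ifs into one condition
theorem pvIfIf {β : Type} (a b : Bool) (x : β) :
    (if a then (if b then some x else none) else none) =
      (if (a && b) then some x else none) := by
  cases a <;> cases b <;> simp

-- getD-based palindrome characterisation of pvP (in-range segment)
theorem pvPIff (xs : List String) (l g : Nat) (h : l + g < xs.length) :
    pvP xs l g = true ↔ (∀ t ≤ g, xs.getD (l + t) "" = xs.getD (l + g - t) "") := by
  unfold pvP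
  rw [beq_iff_eq, pvSegPal xs l (g + 1) (by omega) (by omega)]
  constructor
  · intro hp t ht
    have h' := hp t (by omega)
    rw [List.getD_eq_getElem xs "" (by omega), List.getD_eq_getElem xs "" (by omega)]
    convert h' using 2
    omega
  · intro hq t ht
    have h' := hq t (by omega)
    rw [List.getD_eq_getElem xs "" (by omega), List.getD_eq_getElem xs "" (by omega)] at h'
    convert h' using 2
    omega

theorem pvPZero (xs : List String) (l : Nat) : pvP xs l 0 = true := by
  unfold pvP
  rw [beq_iff_eq]
  match h : (xs.drop l).take 1 with
  | [] => rfl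
  | [a] => rfl
  | a :: b :: t =>
    have := List.length_take_le 1 (xs.drop l)
    rw [h] at this; simp at this

theorem pvPOne (xs : List String) (l : Nat) (h : l + 1 < xs.length) :
    pvP xs l 1 = (xs.getD l "" == xs.getD (l + 1) "") := by
  rw [Bool.eq_iff_iff, beq_iff_eq, pvPIff xs l 1 h]
  constructor
  · intro hq; simpa using hq 0 (by omega)
  · intro he t ht
    interval_cases t
    · simpa using he
    · simpa using he.symm

theorem pvPPeel (xs : List String) (l g : Nat) (h : l + g < xs.length) (hg : 2 ≤ g) :
    pvP xs l g = (pvP xs (l + 1) (g - 2) && (xs.getD l "" == xs.getD (l + g) "")) := by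
  rw [Bool.eq_iff_iff, Bool.and_eq_true, beq_iff_eq,
      pvPIff xs l g h, pvPIff xs (l + 1) (g - 2) (by omega)]
  constructor
  · intro hq
    refine ⟨fun t ht => ?_, by simpa using hq 0 (by omega)⟩
    have := hq (t + 1) (by omega)
    rw [show l + (t + 1) = l + 1 + t by omega,
        show l + g - (t + 1) = l + 1 + (g - 2) - t by omega] at this
    exact this
  · rintro ⟨hin, hend⟩ t ht
    by_cases h0 : t = 0
    · subst h0; simpa using hend
    · by_cases hgt : t = g
      · subst hgt; simpa using hend.symm
      · have := hin (t - 1) (by omega)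
        rw [show l + 1 + (t - 1) = l + t by omega,
            show l + 1 + (g - 2) - (t - 1) = l + g - t by omega] at this
        exact this

-- the active set of one gap iteration holds exactly the palindromic left ends of that gap
theorem pvCurMem (xs : List String) (act2 : List Nat) (gap : Nat) (hgap : gap < xs.length)
    (h2 : 2 ≤ gap → ∀ l, l ∈ act2 ↔ (l < xs.length - (gap - 2) ∧ pvP xs l (gap - 2) = true)) :
    ∀ m, m ∈ pvCur xs xs.length act2 gap ↔ (m < xs.length - gap ∧ pvP xs m gap = true) := by
  intro m
  unfold pvCur
  by_cases hlt : gap < 2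
  · rw [if_pos hlt, List.mem_filter, List.mem_range]
    refine and_congr_right fun hm => ?_
    interval_cases gap
    · simp [pvPZero]
    · rw [pvPOne xs m (by omega)]
  · rw [if_neg hlt, List.mem_filterMap]
    constructor
    · rintro ⟨l, hl, hif⟩
      by_cases hc : 1 ≤ l ∧ l - 1 + gap < xs.length ∧
          xs.getD (l - 1) "" = xs.getD (l - 1 + gap) ""
      · rw [if_pos hc, Option.some_inj] at hif
        obtain ⟨hl1, hlb, hle⟩ := hc
        obtain ⟨hlt2, hpal2⟩ := (h2 (by omega) l).mp hl
        subst hif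
        refine ⟨by omega, ?_⟩
        rw [pvPPeel xs (l - 1) gap (by omega) (by omega)]
        have : l - 1 + 1 = l := by omega
        rw [this]
        simp only [Bool.and_eq_true, beq_iff_eq]
        exact ⟨hpal2, hle⟩
      · rw [if_neg hc] at hif
        exact absurd hif (by simp)
    · rintro ⟨hm, hpal⟩
      refine ⟨m + 1, ?_, ?_⟩
      · have hpeel := pvPPeel xs m gap (by omega) (by omega)
        rw [hpal] at hpeel
        have h2' := (Bool.and_eq_true _ _).mp hpeel.symm
        exact (h2 (by omega) (m + 1)).mpr ⟨by omega, h2'.1⟩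
      · have hpeel := pvPPeel xs m gap (by omega) (by omega)
        rw [hpal] at hpeel
        have h2' := (Bool.and_eq_true _ _).mp hpeel.symm
        rw [if_pos ⟨by omega, by omega, by
          simpa using beq_iff_eq.mp (by simpa using h2'.2)⟩]
        simp

-- pvFirst: peel the first index, append the last index
theorem pvFirstStep (p : Nat → Bool) (m k : Nat) (h : m < k) :
    pvFirst p m k = if p m then some m else pvFirst p (m + 1) k := by
  unfold pvFirst
  rw [show k - m = (k - (m + 1)) + 1 from by omega, List.range'_succ, List.find?_cons]
  by_cases hp : p m <;> simp [hp]

theorem pvFirstNil (p : Nat → Bool) (m k : Nat) (h : k ≤ m) : pvFirst p m k = none := by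
  unfold pvFirst
  rw [show k - m = 0 from by omega]
  rfl

theorem pvFirstSnoc (p : Nat → Bool) (gap : Nat) (h : 1 ≤ gap) :
    pvFirst p 1 (gap + 1) =
      (match pvFirst p 1 gap with
       | some g => some g
       | none => if p gap then some gap else none) := by
  unfold pvFirst
  rw [show gap + 1 - 1 = (gap - 1) + 1 from by omega, List.range'_concat,
      show 1 + 1 * (gap - 1) = gap from by omega, List.find?_append]
  cases (List.range' 1 (gap - 1)).find? p with
  | none => simp [List.find?]; split <;> simp_all
  | some g => rfl

-- contains on a Nat list is membership
theorem pvContains (L : List Nat) (a : Nat) : L.contains a = true ↔ a ∈ L := by simp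

-- the loop invariant: pvLoop from any consistent intermediate state computes pvRhs
theorem pvLoopSpec (xs : List String) (k : Nat) : ∀ (gap : Nat), xs.length - gap = k →
    gap ≤ xs.length →
    ∀ (act2 act1 : List Nat) (fs : Option Nat),
    (2 ≤ gap → ∀ l, l ∈ act2 ↔ (l < xs.length - (gap - 2) ∧ pvP xs l (gap - 2) = true)) →
    (1 ≤ gap → ∀ l, l ∈ act1 ↔ (l < xs.length - (gap - 1) ∧ pvP xs l (gap - 1) = true)) →
    fs = pvFirst (fun g => pvP xs (xs.length - 1 - g) g) 1 gap →
    pvLoop xs xs.length act2 act1 fs gap = pvRhs xs gap fs := by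
  induction k with
  | zero =>
    intro gap hk hle act2 act1 fs _ _ hfs
    have hgap : gap = xs.length := by omega
    rw [pvLoop.eq_def, dif_neg (by omega)]
    unfold pvRhs
    rw [pvFirstNil _ _ _ (by omega), pvFirstNil _ _ _ (by omega)]
    cases fs <;> rfl
  | succ k ih =>
    intro gap hk hle act2 act1 fs h2 h1 hfs
    have hgap : gap < xs.length := by omega
    rw [pvLoop.eq_def, dif_pos hgap]
    have hcm := pvCurMem xs act2 gap hgap h2
    have c0 : (pvCur xs xs.length act2 gap).contains 0 = pvP xs 0 gap := by
      rw [Bool.eq_iff_iff, pvContains, hcm 0]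
      exact ⟨fun h => h.2, fun h => ⟨by omega, h⟩⟩
    have csuf : (pvCur xs xs.length act2 gap).contains (xs.length - 1 - gap)
        = pvP xs (xs.length - 1 - gap) gap := by
      rw [Bool.eq_iff_iff, pvContains, hcm (xs.length - 1 - gap)]
      exact ⟨fun h => h.2, fun h => ⟨by omega, h⟩⟩
    simp only [c0, csuf]
    by_cases hg0 : 1 ≤ gap
    · by_cases hpfx : pvP xs 0 gap = true
      · rw [if_pos (by simp [hg0, hpfx])]
        unfold pvRhs
        rw [show max gap 1 = gap from by omega, pvFirstStep _ _ _ hgap, if_pos hpfx]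
      · rw [if_neg (by simp [hpfx])]
        have hfs' : (if (1 ≤ gap : Bool) && fs.isNone && pvP xs (xs.length - 1 - gap) gap
              then some gap else fs)
            = pvFirst (fun g => pvP xs (xs.length - 1 - g) g) 1 (gap + 1) := by
          rw [pvFirstSnoc _ _ hg0, ← hfs]
          cases fs with
          | some g => simp
          | none =>
            by_cases hs : pvP xs (xs.length - 1 - gap) gap = true
            · simp [hg0, hs]
            · simp [hs]
        rw [ih (gap + 1) (by omega) (by omega) act1 (pvCur xs xs.length act2 gap)
              (if (decide (1 ≤ gap) && fs.isNone && pvP xs (xs.length - 1 - gap) gap) = true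
                then some gap else fs)
              (fun _ => h1 hg0)
              (fun _ => hcm)
              hfs']
        unfold pvRhs
        rw [show max gap 1 = gap from by omega, show max (gap + 1) 1 = gap + 1 from by omega]
        rw [pvFirstStep (fun g => pvP xs 0 g) gap xs.length hgap, if_neg hpfx]
        cases fs with
        | some g => simp
        | none =>
          rw [pvFirstStep (fun g => pvP xs (xs.length - 1 - g) g) gap xs.length hgap]
          by_cases hs : pvP xs (xs.length - 1 - gap) gap = true
          · rw [if_pos hs]
            simp [hg0, hs]
          · rw [if_neg hs]
            simp [hs]
    · have hgap0 : gap = 0 := by omega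
      subst hgap0
      rw [if_neg (by simp)]
      have hfs0 : fs = none := by rw [hfs, pvFirstNil _ _ _ (by omega)]
      subst hfs0
      rw [if_neg (show ¬((decide (1 ≤ 0) && (none : Option Nat).isNone &&
            pvP xs (xs.length - 1 - 0) 0) = true) from by simp)]
      rw [ih 1 (by omega) (by omega) act1 (pvCur xs xs.length act2 0) none
            (fun h => absurd h (by omega))
            (fun _ => hcm)
            (pvFirstNil _ 1 1 (le_refl 1)).symm]
      rfl

-- B computes the closed form pvVal
theorem pvAltEq (xs : List String) : horizontal_detection_alt xs = pvVal xs := by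
  unfold horizontal_detection_alt
  rw [pvLoopSpec xs (xs.length - 0) 0 rfl (by omega) [] [] none
        (fun h => absurd h (by omega)) (fun h => absurd h (by omega))
        (pvFirstNil _ _ _ (by omega)).symm]
  unfold pvRhs pvVal
  rfl

-- A's ascending Int range is the cast of the Nat range'
theorem pvRangeOneNat (n : Nat) :
    PySem.List.pyRange 1 (n : Int) 1 = (List.range' 1 (n - 1)).map (fun g : Nat => (g : Int)) := by
  rw [PySem.List.pyRange_one, List.range'_eq_map_range, List.map_map,
      show ((n : Int) - 1).toNat = n - 1 from by omega]
  exact List.map_congr_left (fun k _ => by simp only [Function.comp_apply]; omega)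

-- A's descending right range is the ascending range mapped through g ↦ n-1-g
theorem pvRangeFlip (n : Int) :
    PySem.List.pyRange (n - 2) (-1) (-1)
      = (PySem.List.pyRange 1 n 1).map (fun g => n - 1 - g) := by
  rw [PySem.List.pyRange_neg_one, PySem.List.pyRange_one, List.map_map,
      show (n - 2 - (-1)).toNat = (n - 1).toNat from by omega]
  exact List.map_congr_left (fun k _ => by simp only [Function.comp_apply]; omega)

-- A's left-scan condition at j is the prefix-palindrome flag
theorem pvLeftCond (xs : List String) (j : Int) (h1 : 1 ≤ j) (h2 : j < (xs.length : Int)) :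
    ((PySem.List.pyGetD xs 0 "" == PySem.List.pyGetD xs j "") && pvAllSame xs 0 j)
      = pvP xs 0 j.toNat := by
  rw [Bool.eq_iff_iff]
  have hpal := pvCondPal xs 0 (j.toNat + 1) (by omega) (by omega)
  simp only [Nat.cast_zero] at hpal
  rw [show (0 : Int) + ((j.toNat + 1 : Nat) : Int) - 1 = j from by omega] at hpal
  rw [hpal]
  unfold pvP
  rw [beq_iff_eq, List.drop_zero]

-- A's right-scan condition at j = n-1-g is the suffix-palindrome flag
theorem pvRightCond (xs : List String) (hne : xs ≠ []) (g : Int) (h1 : 1 ≤ g)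
    (h2 : g < (xs.length : Int)) :
    ((PySem.List.pyGetD xs (-1) "" == PySem.List.pyGetD xs ((xs.length : Int) - 1 - g) "") &&
        pvAllSame xs ((xs.length : Int) - 1 - g) ((xs.length : Int) - 1))
      = pvP xs (xs.length - 1 - g.toNat) g.toNat := by
  rw [Bool.eq_iff_iff]
  have hpal := pvCondPal xs (xs.length - 1 - g.toNat) (g.toNat + 1) (by omega) (by omega)
  rw [show (((xs.length - 1 - g.toNat : Nat)) : Int) = (xs.length : Int) - 1 - g from by omega]
    at hpal
  rw [show (xs.length : Int) - 1 - g + ((g.toNat + 1 : Nat) : Int) - 1 = (xs.length : Int) - 1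
    from by omega] at hpal
  have hneg : PySem.List.pyGetD xs (-1) "" = PySem.List.pyGetD xs ((xs.length : Int) - 1) "" := by
    rw [PySem.List.pyGetD_neg_one xs "" hne,
        PySem.List.pyGetD_eq_getElem xs ""
          (by have : xs.length ≠ 0 := fun h => hne (List.eq_nil_of_length_eq_zero h); omega)
          (by omega),
        List.getLast_eq_getElem]
    congr 1
    omega
  rw [hneg, pvBeqComm, hpal]
  unfold pvP
  rw [beq_iff_eq]

-- ===== VERDICT (by name: the statement is the Claim_ definition above) =====
theorem horizontal_detection_spec : Claim_equal_horizontal_detection := by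
  intro shadows _ hpre
  unfold Spec_horizontal_detection
  rw [pvAltEq]
  unfold horizontal_detection pvVal
  rw [show (PySem.List.pyRange 1 ((shadows.length : Int)) 1).findSome? (fun j =>
        if PySem.List.pyGetD shadows 0 "" == PySem.List.pyGetD shadows j "" then
          if pvAllSame shadows 0 j then some (PySem.Int.floordiv (100 * (j + 1)) 2) else none
        else none)
      = (pvFirst (fun g => pvP shadows 0 g) 1 shadows.length).map
          (fun g : Nat => PySem.Int.floordiv (100 * ((g : Int) + 1)) 2) from by
    rw [pvFindSome?_congr_mem _ _ (fun j =>
          if ((PySem.List.pyGetD shadows 0 "" == PySem.List.pyGetD shadows j "") &&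
              pvAllSame shadows 0 j) then some (PySem.Int.floordiv (100 * (j + 1)) 2) else none)
        (fun j hj => pvIfIf _ _ _)]
    rw [pvFindSome?_congr_mem _ _ (fun j =>
          if pvP shadows 0 j.toNat then some (PySem.Int.floordiv (100 * (j + 1)) 2) else none)
        (fun j hj => by
          rw [PySem.List.mem_pyRange_one] at hj
          rw [pvLeftCond shadows j hj.1 hj.2])]
    rw [pvRangeOneNat, List.findSome?_map]
    rw [pvFindSome?_congr_mem _ _ (fun g : Nat =>
          if pvP shadows 0 g then some (PySem.Int.floordiv (100 * ((g : Int) + 1)) 2) else none)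
        (fun g hg => by simp only [Function.comp_apply, Int.toNat_natCast]; norm_cast)]
    exact pvFindSome?_if _ (fun g => pvP shadows 0 g)
      (fun g : Nat => PySem.Int.floordiv (100 * ((g : Int) + 1)) 2)]
  rw [show (PySem.List.pyRange ((shadows.length : Int) - 2) (-1) (-1)).findSome? (fun j =>
        if PySem.List.pyGetD shadows (-1) "" == PySem.List.pyGetD shadows j "" then
          if pvAllSame shadows j ((shadows.length : Int) - 1) then
            some (100 * (j + PySem.Int.floordiv ((shadows.length : Int) - j) 2))
          else none
        else none)
      = (pvFirst (fun g => pvP shadows (shadows.length - 1 - g) g) 1 shadows.length).map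
          (fun g : Nat => 100 * (((shadows.length : Int) - 1 - (g : Int)) +
            PySem.Int.floordiv ((shadows.length : Int) - ((shadows.length : Int) - 1 - (g : Int)))
              2)) from by
    rw [pvRangeFlip, List.findSome?_map]
    rw [pvFindSome?_congr_mem _ _ (fun g : Int =>
          if pvP shadows (shadows.length - 1 - g.toNat) g.toNat then
            some (100 * (((shadows.length : Int) - 1 - g) +
              PySem.Int.floordiv ((shadows.length : Int) - ((shadows.length : Int) - 1 - g)) 2))
          else none)
        (fun g hg => by
          rw [PySem.List.mem_pyRange_one] at hg
          simp only [Function.comp_apply]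
          rw [pvIfIf, pvRightCond shadows hpre g hg.1 hg.2])]
    rw [pvRangeOneNat, List.findSome?_map]
    rw [pvFindSome?_congr_mem _ _ (fun g : Nat =>
          if pvP shadows (shadows.length - 1 - g) g then
            some (100 * (((shadows.length : Int) - 1 - (g : Int)) +
              PySem.Int.floordiv ((shadows.length : Int) - ((shadows.length : Int) - 1 - (g : Int)))
                2))
          else none)
        (fun g hg => by simp only [Function.comp_apply, Int.toNat_natCast]; norm_cast)]
    exact pvFindSome?_if _ (fun g => pvP shadows (shadows.length - 1 - g) g)
      (fun g : Nat => 100 * (((shadows.length : Int) - 1 - (g : Int)) +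
        PySem.Int.floordiv ((shadows.length : Int) - ((shadows.length : Int) - 1 - (g : Int))) 2))]
  cases pvFirst (fun g => pvP shadows 0 g) 1 shadows.length with
  | some g => rfl
  | none =>
    cases pvFirst (fun g => pvP shadows (shadows.length - 1 - g) g) 1 shadows.length with
    | some g => rfl
    | none => rfl
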